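-- pv_equiv track=rewrite | github.com/shainer/matasano | set2/cut_paste.py | StripPadding
-- ===== SOURCE A (Python) =====
-- def StripPadding(string):
-- 	# A bit of a lazy implementation that is not really verifying
-- 	# that this is correct Pkcs7; we just remove non-ASCII bytes
-- 	# at the end of the string, since padding is usually composed
-- 	# of those. I will do a more canonical implementation once I
-- 	# figure out how encoding works.
-- 	def ReadableAscii(i):
-- 		return (i == 10 or (i > 31 and i < 127))
--
-- 	index = len(string) - 1
--
-- 	for ch in string[::-1]:
-- 		if ReadableAscii(ch):
-- 			break
-- 		index -= 1
--
-- 	return string[:index+1]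
-- ===== SOURCE B (Python) =====
-- def StripPadding(string):
-- 	def ReadableAscii(i):
-- 		return (i == 10 or (i > 31 and i < 127))
--
-- 	last = -1
-- 	for i, ch in enumerate(string):
-- 		if ReadableAscii(ch):
-- 			last = i
--
-- 	return string[:last+1]
-- ===== Notes on version B (the rewrite author's own statement) =====
-- stated objective: alternative
-- what changed: Instead of scanning the reversed list with an early break while decrementing a trailing index, B makes one forward pass with enumerate keeping the index of the last readable byte, then slices up to it.
import Mathlib
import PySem

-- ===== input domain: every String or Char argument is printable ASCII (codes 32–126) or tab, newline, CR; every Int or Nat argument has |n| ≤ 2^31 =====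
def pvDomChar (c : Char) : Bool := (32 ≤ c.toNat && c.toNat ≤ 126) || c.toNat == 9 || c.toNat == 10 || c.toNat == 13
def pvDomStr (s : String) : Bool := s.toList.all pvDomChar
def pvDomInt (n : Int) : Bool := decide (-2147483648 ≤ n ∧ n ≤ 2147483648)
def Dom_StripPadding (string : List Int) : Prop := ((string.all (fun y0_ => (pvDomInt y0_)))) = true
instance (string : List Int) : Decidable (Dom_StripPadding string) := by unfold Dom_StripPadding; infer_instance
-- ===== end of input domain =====

-- B differs from A by decomposition only (forward pass tracking the last readable index,
-- no early break), same O(n) cost; equivalence is exact on all inputs.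

-- ===== PORT A =====
def readableAsciiA (i : Int) : Bool := i == 10 || (i > 31 && i < 127)

-- the for-loop over string[::-1] with its early break and decrementing index
def aLoop : List Int → Int → Int
  | [], index => index
  | ch :: rest, index => if readableAsciiA ch then index else aLoop rest (index - 1)

def StripPadding (string : List Int) : List Int :=
  -- string[::-1] is string.reverse (PySem.List.slice?_none_none_neg_one)
  let index := aLoop string.reverse ((string.length : Int) - 1)
  PySem.List.slice string none (some (index + 1))

-- ===== PORT B =====
def readableAsciiB (i : Int) : Bool := i == 10 || (i > 31 && i < 127)

def StripPadding_alt (string : List Int) : List Int :=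
  let last := (PySem.List.enumerate string 0).foldl
    (fun last p => if readableAsciiB p.2 then p.1 else last) (-1)
  PySem.List.slice string none (some (last + 1))

-- ===== PRECONDITION & SPEC =====
def Spec_StripPadding (string : List Int) (out : List Int) : Prop := out = StripPadding_alt string
instance (string : List Int) (out : List Int) : Decidable (Spec_StripPadding string out) := by unfold Spec_StripPadding; infer_instance

-- ===== CLAIM (what is proved, stated in full; the proofs are below) =====
def Claim_equal_StripPadding : Prop := ∀ (string : List Int), Dom_StripPadding string → Spec_StripPadding string (StripPadding string)

-- ===== LEMMAS AND PROOFS =====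

theorem aLoop_snoc (s : List Int) (c : Int) :
    aLoop ((s ++ [c]).reverse) (((s ++ [c]).length : Int) - 1)
      = if readableAsciiA c then (s.length : Int)
        else aLoop s.reverse ((s.length : Int) - 1) := by
  simp [aLoop]

theorem bFold_snoc (s : List Int) (c : Int) :
    (PySem.List.enumerate (s ++ [c]) 0).foldl
        (fun last p => if readableAsciiB p.2 then p.1 else last) (-1)
      = if readableAsciiB c then (s.length : Int)
        else (PySem.List.enumerate s 0).foldl
            (fun last p => if readableAsciiB p.2 then p.1 else last) (-1) := by
  rw [PySem.List.enumerate_append]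
  simp [PySem.List.enumerate_cons, PySem.List.enumerate_nil]

theorem idx_eq (s : List Int) :
    aLoop s.reverse ((s.length : Int) - 1)
      = (PySem.List.enumerate s 0).foldl
          (fun last p => if readableAsciiB p.2 then p.1 else last) (-1) := by
  induction s using List.reverseRecOn with
  | nil => simp [aLoop, PySem.List.enumerate_nil]
  | append_singleton s c ih =>
      rw [aLoop_snoc, bFold_snoc]
      have h : readableAsciiA c = readableAsciiB c := rfl
      rw [h, ih]

-- ===== VERDICT (by name: the statement is the Claim_ definition above) =====
theorem StripPadding_spec : Claim_equal_StripPadding := by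
  intro string _
  unfold Spec_StripPadding StripPadding StripPadding_alt
  rw [idx_eq]
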